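-- pv_equiv track=rewrite | github.com/aliebnemara/budget-management-backend | create_smart_ramadan_system.py | _format_day_ranges
-- ===== SOURCE A (Python) =====
-- from typing import Dict, List, Tuple, Optional
--
-- def _format_day_ranges(days: List[int]) -> str:
--     """Format a list of days into readable ranges (e.g., '1-5, 8-10, 15')"""
--     if not days:
--         return ""
--
--     days = sorted(days)
--     ranges = []
--     start = days[0]
--     end = days[0]
--
--     for i in range(1, len(days)):
--         if days[i] == end + 1:
--             end = days[i]
--         else:
--             if start == end:
--                 ranges.append(str(start))
--             else:
--                 ranges.append(f"{start}-{end}")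
--             start = days[i]
--             end = days[i]
--
--     if start == end:
--         ranges.append(str(start))
--     else:
--         ranges.append(f"{start}-{end}")
--
--     return ", ".join(ranges)
-- ===== SOURCE B (Python) =====
-- from itertools import groupby
--
-- def _format_day_ranges(days):
--     days = sorted(days)
--     pieces = []
--     for _, grp in groupby(enumerate(days), key=lambda p: p[1] - p[0]):
--         vals = [v for _, v in grp]
--         first = vals[0]
--         last = vals[-1]
--         pieces.append(str(first) if first == last else f"{first}-{last}")
--     return ", ".join(pieces)
-- ===== Notes on version B (the rewrite author's own statement) =====
-- stated objective: idiomatic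
-- what changed: Replaced A's hand-rolled start/end accumulator loop with appended closing pieces by itertools.groupby over enumerate(sorted(days)) keyed on value-minus-index, mapping each maximal consecutive run to its piece.
import Mathlib
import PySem

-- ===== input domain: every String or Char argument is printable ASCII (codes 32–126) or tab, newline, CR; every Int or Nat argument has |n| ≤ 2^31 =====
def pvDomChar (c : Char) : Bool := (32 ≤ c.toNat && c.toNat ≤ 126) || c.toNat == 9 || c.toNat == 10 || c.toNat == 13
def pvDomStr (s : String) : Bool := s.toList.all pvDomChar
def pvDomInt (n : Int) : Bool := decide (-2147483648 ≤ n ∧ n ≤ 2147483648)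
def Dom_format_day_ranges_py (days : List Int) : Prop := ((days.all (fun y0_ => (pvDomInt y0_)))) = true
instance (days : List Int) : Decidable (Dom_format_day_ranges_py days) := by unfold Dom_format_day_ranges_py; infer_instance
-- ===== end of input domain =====

-- B replaces A's hand-rolled start/end accumulator loop by a groupby-style decomposition:
-- group enumerate(sorted(days)) by value-minus-index, one piece per maximal consecutive run (objective: idiomatic).

-- ===== PORT A =====
-- str(start) / f"{start}-{end}" piece A appends when it closes a range
def pvAClose (start e : Int) : String :=
  if start == e then PySem.Int.toStr start
  else PySem.Int.toStr start ++ "-" ++ PySem.Int.toStr e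

-- the for-loop of A over days[1:], carrying (start, end, ranges); final append folded into the base case
def pvALoop : Int → Int → List String → List Int → List String
  | start, e, ranges, [] => ranges ++ [pvAClose start e]
  | start, e, ranges, d :: rest =>
      if d == e + 1 then pvALoop start d ranges rest
      else pvALoop d d (ranges ++ [pvAClose start e]) rest

def format_day_ranges_py (days : List Int) : String :=
  if days = [] then ""
  else
    match PySem.List.sorted days (fun x => x) false with
    | [] => ""       -- unreachable: sorted of a nonempty list is nonempty
    | d0 :: rest => PySem.Str.join ", " (pvALoop d0 d0 [] rest)

-- ===== PORT B =====
-- groupby key: value minus index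
def pvKey (p : Int × Int) : Int := p.2 - p.1

-- itertools.groupby: maximal blocks of adjacent elements with equal key
def pvGroupBy : List (Int × Int) → List (List (Int × Int))
  | [] => []
  | x :: xs =>
      (x :: xs.takeWhile (fun y => pvKey y == pvKey x)) ::
        pvGroupBy (xs.dropWhile (fun y => pvKey y == pvKey x))
  termination_by l => l.length
  decreasing_by
    exact Nat.lt_succ_of_le (List.length_dropWhile_le _ _)

-- one group → one piece: vals = [v for _, v in grp]; str(first) or f"{first}-{last}"
def pvBPiece (g : List (Int × Int)) : String :=
  match g.map Prod.snd with
  | [] => ""       -- unreachable: groupby groups are nonempty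
  | f :: vs =>
      let l := vs.getLastD f
      if f == l then PySem.Int.toStr f
      else PySem.Int.toStr f ++ "-" ++ PySem.Int.toStr l

def format_day_ranges_py_alt (days : List Int) : String :=
  let s := PySem.List.sorted days (fun x => x) false
  PySem.Str.join ", " ((pvGroupBy (PySem.List.enumerate s 0)).map pvBPiece)

-- ===== PRECONDITION & SPEC =====
def Spec_format_day_ranges_py (days : List Int) (out : String) : Prop := out = format_day_ranges_py_alt days
instance (days : List Int) (out : String) : Decidable (Spec_format_day_ranges_py days out) := by unfold Spec_format_day_ranges_py; infer_instance

-- ===== CLAIM (what is proved, stated in full; the proofs are below) =====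
def Claim_equal_format_day_ranges_py : Prop := ∀ (days : List Int), Dom_format_day_ranges_py days → Spec_format_day_ranges_py days (format_day_ranges_py days)

-- ===== LEMMAS AND PROOFS =====

-- the piece of the group whose run started at value `start` (mid-run view of the first group)
def pvBPieceW (start : Int) (g : List (Int × Int)) : String :=
  let l := (g.map Prod.snd).getLastD start
  if start == l then PySem.Int.toStr start
  else PySem.Int.toStr start ++ "-" ++ PySem.Int.toStr l

lemma pvBPiece_eq_W (x : Int × Int) (g : List (Int × Int)) :
    pvBPiece (x :: g) = pvBPieceW x.2 (x :: g) := by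
  simp only [pvBPiece, pvBPieceW, List.map_cons, List.getLastD_cons]

lemma pvGroupBy_cons (x : Int × Int) (xs : List (Int × Int)) :
    pvGroupBy (x :: xs) =
      (x :: xs.takeWhile (fun y => pvKey y == pvKey x)) ::
        pvGroupBy (xs.dropWhile (fun y => pvKey y == pvKey x)) := by
  rw [pvGroupBy.eq_def]

lemma pvMain (rest : List Int) : ∀ (i start e : Int) (ranges : List String),
    pvALoop start e ranges rest =
      ranges ++
        (pvBPieceW start
            ((i, e) :: (PySem.List.enumerate rest (i+1)).takeWhile
                (fun y => pvKey y == pvKey (i, e))) ::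
          (pvGroupBy ((PySem.List.enumerate rest (i+1)).dropWhile
                (fun y => pvKey y == pvKey (i, e)))).map pvBPiece) := by
  induction rest with
  | nil =>
      intro i start e ranges
      simp [pvALoop, pvBPieceW, pvAClose, PySem.List.enumerate_nil, pvGroupBy]
  | cons d rest ih =>
      intro i start e ranges
      rw [PySem.List.enumerate_cons]
      by_cases hd : d = e + 1
      · subst hd
        have hkey : pvKey (i + 1, e + 1) = pvKey (i, e) := by
          show (e + 1) - (i + 1) = e - i; ring
        have hk : (pvKey (i + 1, e + 1) == pvKey (i, e)) = true := by
          rw [hkey]; exact beq_self_eq_true _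
        rw [show pvALoop start e ranges ((e + 1) :: rest) =
              pvALoop start (e + 1) ranges rest from by simp [pvALoop]]
        rw [ih (i + 1) start (e + 1) ranges]
        simp only [List.takeWhile_cons, List.dropWhile_cons, hkey, beq_self_eq_true,
          if_true, pvBPieceW, List.map_cons, List.getLastD_cons]
      · have hk : (pvKey (i + 1, d) == pvKey (i, e)) = false := by
          have : pvKey (i + 1, d) ≠ pvKey (i, e) := by
            show d - (i + 1) ≠ e - i; omega
          simpa using this
        rw [show pvALoop start e ranges (d :: rest) =
              pvALoop d d (ranges ++ [pvAClose start e]) rest from by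
            simp [pvALoop, hd]]
        rw [ih (i + 1) d d (ranges ++ [pvAClose start e])]
        simp only [List.takeWhile_cons, List.dropWhile_cons, hk, Bool.false_eq_true,
          if_false]
        rw [pvGroupBy_cons]
        simp only [List.map_cons, pvBPiece_eq_W, List.append_assoc, List.cons_append,
          List.nil_append]
        simp [pvBPieceW, pvAClose]

theorem format_day_ranges_py_spec : Claim_equal_format_day_ranges_py := by
  intro days _
  unfold Spec_format_day_ranges_py format_day_ranges_py format_day_ranges_py_alt
  by_cases h : days = []
  · subst h
    have hnil : PySem.List.sorted ([] : List Int) (fun x => x) false = [] := by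
      rw [PySem.List.sorted_eq_nil_iff]
    simp only [hnil, PySem.List.enumerate_nil, pvGroupBy, List.map_nil]
    decide
  · simp only [if_neg h]
    have hs : PySem.List.sorted days (fun x => x) false ≠ [] := by
      rw [Ne, PySem.List.sorted_eq_nil_iff]; exact h
    cases hsort : PySem.List.sorted days (fun x => x) false with
    | nil => exact absurd hsort hs
    | cons d0 rest =>
        show PySem.Str.join ", " (pvALoop d0 d0 [] rest) = _
        rw [PySem.List.enumerate_cons, pvGroupBy_cons, pvMain rest 0 d0 d0 []]
        simp [pvBPiece_eq_W]
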